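-- pv_equiv track=rewrite | github.com/dlesbre/cephalopode | compile/mk_ops.py | rec_next_rule
-- ===== SOURCE A (Python) =====
-- letters = [chr(letter_id) for letter_id in range(ord('a'),ord('z')+1)]
--
-- def rec_next_rule(uname, arity, swap_rank):
--     if arity==0:
--         return ("PRIM_FUN "+uname)
--     else:
--         middle=rec_next_rule(uname, arity-1, swap_rank-1)
--         cur_letter = letters[arity-1]
--         if swap_rank<=0:
--             return ("APPL ("+middle+") " + cur_letter)
--         else:
--             return ("APPL " + cur_letter + " ("+middle+")")
-- ===== SOURCE B (Python) =====
-- letters = [chr(letter_id) for letter_id in range(ord('a'), ord('z')+1)]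
--
-- def rec_next_rule(uname, arity, swap_rank):
--     result = "PRIM_FUN " + uname
--     for i in range(1, arity + 1):
--         letter = letters[i - 1]
--         if swap_rank - (arity - i) <= 0:
--             result = "APPL (" + result + ") " + letter
--         else:
--             result = "APPL " + letter + " (" + result + ")"
--     return result
-- ===== Notes on version B (the rewrite author's own statement) =====
-- stated objective: simpler
-- what changed: Replaced the recursion (which threads a decremented swap_rank through nested calls) by a single bottom-up loop over i=1..arity that builds the string outward, computing each level's effective rank as swap_rank-(arity-i).
import Mathlib
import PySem

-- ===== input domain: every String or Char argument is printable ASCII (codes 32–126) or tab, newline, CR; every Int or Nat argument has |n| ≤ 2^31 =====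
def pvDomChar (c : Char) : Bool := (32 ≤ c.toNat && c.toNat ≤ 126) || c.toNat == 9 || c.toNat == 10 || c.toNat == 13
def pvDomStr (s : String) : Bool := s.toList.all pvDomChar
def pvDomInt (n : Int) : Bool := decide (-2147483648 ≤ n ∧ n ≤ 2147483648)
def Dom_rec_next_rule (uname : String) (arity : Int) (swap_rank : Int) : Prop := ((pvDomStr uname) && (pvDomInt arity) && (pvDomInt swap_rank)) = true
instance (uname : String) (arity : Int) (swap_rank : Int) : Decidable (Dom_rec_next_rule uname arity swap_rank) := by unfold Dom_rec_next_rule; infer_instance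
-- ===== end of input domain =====

-- B replaces A's recursion by a bottom-up loop computing each level's effective rank; objective: simpler.


-- ===== PORT A =====
-- letters = [chr(c) for c in range(ord('a'), ord('z')+1)]
def pvLetters : List String :=
  ["a","b","c","d","e","f","g","h","i","j","k","l","m",
   "n","o","p","q","r","s","t","u","v","w","x","y","z"]

-- A's recursion, on arity.toNat (Python diverges for negative arity; Pre_ excludes it).
-- letters[arity-1] is PySem.List.pyGet?; out-of-range (IndexError) is excluded by Pre_.
def pvRecA (uname : String) (swap_rank : Int) : Nat → String
  | 0 => "PRIM_FUN " ++ uname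
  | n + 1 =>
    let middle := pvRecA uname (swap_rank - 1) n
    let cur_letter := (PySem.List.pyGet? pvLetters ((n : Int) + 1 - 1)).getD ""
    if swap_rank ≤ 0 then "APPL (" ++ middle ++ ") " ++ cur_letter
    else "APPL " ++ cur_letter ++ " (" ++ middle ++ ")"

def rec_next_rule (uname : String) (arity : Int) (swap_rank : Int) : String :=
  pvRecA uname swap_rank arity.toNat

-- ===== PORT B =====
def rec_next_rule_alt (uname : String) (arity : Int) (swap_rank : Int) : String :=
  (PySem.List.pyRange 1 (arity + 1) 1).foldl
    (fun result i =>
      let letter := (PySem.List.pyGet? pvLetters (i - 1)).getD ""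
      if swap_rank - (arity - i) ≤ 0 then "APPL (" ++ result ++ ") " ++ letter
      else "APPL " ++ letter ++ " (" ++ result ++ ")")
    ("PRIM_FUN " ++ uname)

-- ===== PRECONDITION & SPEC =====
-- Pre_ excludes arity < 0 (A recurses forever: RecursionError) and arity > 26 (letters[arity-1] raises IndexError).
def Pre_rec_next_rule (uname : String) (arity : Int) (swap_rank : Int) : Prop :=
  0 ≤ arity ∧ arity ≤ 26
instance (uname : String) (arity : Int) (swap_rank : Int) : Decidable (Pre_rec_next_rule uname arity swap_rank) := by unfold Pre_rec_next_rule; infer_instance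
def pvWitness_rec_next_rule : String × Int × Int := ("f", 2, 1)

def Spec_rec_next_rule (uname : String) (arity : Int) (swap_rank : Int) (out : String) : Prop := out = rec_next_rule_alt uname arity swap_rank
instance (uname : String) (arity : Int) (swap_rank : Int) (out : String) : Decidable (Spec_rec_next_rule uname arity swap_rank out) := by unfold Spec_rec_next_rule; infer_instance

-- ===== CLAIM (what is proved, stated in full; the proofs are below) =====
def Claim_equal_rec_next_rule : Prop := ∀ (uname : String) (arity : Int) (swap_rank : Int), Dom_rec_next_rule uname arity swap_rank → Pre_rec_next_rule uname arity swap_rank → Spec_rec_next_rule uname arity swap_rank (rec_next_rule uname arity swap_rank)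

-- ===== LEMMAS AND PROOFS =====

-- B's loop step, with the outer (arity, swap_rank) pair abstracted as (a, s).
def pvStep (s a : Int) (result : String) (i : Int) : String :=
  let letter := (PySem.List.pyGet? pvLetters (i - 1)).getD ""
  if s - (a - i) ≤ 0 then "APPL (" ++ result ++ ") " ++ letter
  else "APPL " ++ letter ++ " (" ++ result ++ ")"

-- A's recursion equals B's fold over 1..n whenever the effective rank at the top matches.
theorem pvRecA_eq_foldl (uname : String) (n : Nat) :
    ∀ (s a : Int),
    pvRecA uname (s - (a - n)) n =
      (PySem.List.pyRange 1 ((n : Int) + 1) 1).foldl (pvStep s a) ("PRIM_FUN " ++ uname) := by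
  induction n with
  | zero =>
    intro s a
    simp [pvRecA]
  | succ n ih =>
    intro s a
    have hsplit : PySem.List.pyRange 1 ((n : Int) + 1 + 1) 1
        = PySem.List.pyRange 1 ((n : Int) + 1) 1 ++ [(n : Int) + 1] := by
      have := PySem.List.pyRange_one_succ_right (a := 1) (b := (n : Int) + 1) (by omega)
      simpa using this
    have hinner : (s - (a - ((n : Int) + 1))) - 1 = s - (a - n) := by ring
    have ihx := ih s a
    push_cast
    rw [hsplit, List.foldl_append]
    simp only [pvRecA, hinner, ihx, List.foldl_cons, List.foldl_nil, pvStep]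

-- ===== VERDICT (by name: the statement is the Claim_ definition above) =====
theorem rec_next_rule_spec : Claim_equal_rec_next_rule := by
  intro uname arity swap_rank _ hpre
  obtain ⟨h0, _⟩ := hpre
  unfold Spec_rec_next_rule rec_next_rule rec_next_rule_alt
  have hn : (arity.toNat : Int) = arity := Int.toNat_of_nonneg h0
  have := pvRecA_eq_foldl uname arity.toNat swap_rank arity
  rw [hn] at this
  have h2 : swap_rank - (arity - arity) = swap_rank := by ring
  rw [h2] at this
  exact this
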